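-- pv_equiv track=rewrite | github.com/DHCW-Digital-Health-and-Care-Wales/Integration-Hub-Beta | shared_libs/hl7_validation/tests/test_convert_no_data_loss.py | _normalize_field_value
-- ===== SOURCE A (Python) =====
-- def _normalize_field_value(value: str) -> str:
--     """
--     Normalize an HL7 field string for semantic equality checks.
--
--     Trailing empty components (e.g., "^^W00000^") are formatting-only and
--     can be dropped by parser/serializer round-trips without losing data.
--     For example, ^^W00000^ equals ^^W00000.
--     """
--     repetitions = value.split("~")
--     normalized_reps: list[str] = []
--
--     for rep in repetitions:
--         components = rep.split("^")
--         while components and components[-1] == "":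
--             components.pop()
--         normalized_reps.append("^".join(components))
--
--     return "~".join(normalized_reps)
-- ===== SOURCE B (Python) =====
-- def _normalize_field_value(value: str) -> str:
--     # A trailing empty component is exactly a trailing '^', so rstrip('^')
--     # drops them all; no component list is built.
--     return "~".join(rep.rstrip("^") for rep in value.split("~"))
-- ===== Notes on version B (the rewrite author's own statement) =====
-- stated objective: simpler
-- what changed: Replaced the per-repetition tokenise/while-pop/rejoin of components by a single rstrip('^') on the raw repetition string, since trailing empty components are exactly trailing '^' characters.
import Mathlib
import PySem

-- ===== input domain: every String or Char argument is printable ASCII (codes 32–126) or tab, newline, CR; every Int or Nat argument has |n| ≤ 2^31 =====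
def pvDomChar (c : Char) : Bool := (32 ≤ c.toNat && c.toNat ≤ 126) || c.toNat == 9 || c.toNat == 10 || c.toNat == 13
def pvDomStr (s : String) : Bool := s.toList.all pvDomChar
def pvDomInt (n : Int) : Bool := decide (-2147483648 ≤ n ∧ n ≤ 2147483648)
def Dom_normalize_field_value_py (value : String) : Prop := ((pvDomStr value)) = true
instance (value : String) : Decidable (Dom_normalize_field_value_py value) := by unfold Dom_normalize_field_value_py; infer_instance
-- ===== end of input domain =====

-- B replaces A's per-repetition split('^')/while-pop/join('^') by a single rstrip('^')
-- on the raw repetition string (simpler decomposition; same return value).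


-- ===== PORT A =====
-- A's `while components and components[-1] == "": components.pop()` loop
def popLoopA (components : List (List Char)) : List (List Char) :=
  if _h : components ≠ [] ∧ PySem.List.pyGet? components (-1) = some ([] : List Char) then
    popLoopA components.dropLast
  else components
termination_by components.length
decreasing_by
  have hne := _h.1
  cases components with
  | nil => exact absurd rfl hne
  | cons x xs => simp

def normalize_field_value_py (value : String) : String :=
  let repetitions := PySem.Chars.splitOn value.toList ['~']
  let normalized_reps : List (List Char) :=
    repetitions.foldl (fun acc rep =>
      let components := PySem.Chars.splitOn rep ['^']
      let components := popLoopA components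
      acc ++ [PySem.Chars.join ['^'] components]) []
  String.ofList (PySem.Chars.join ['~'] normalized_reps)

-- ===== PORT B =====
-- rep.rstrip("^") ported by hand (no PySem rstrip-with-chars primitive):
-- drop the trailing run of '^' via reverse/dropWhile — exact for this single-char set.
def normalize_field_value_py_alt (value : String) : String :=
  String.ofList (PySem.Chars.join ['~']
    ((PySem.Chars.splitOn value.toList ['~']).map
      (fun rep => (List.dropWhile (· == '^') rep.reverse).reverse)))

-- ===== PRECONDITION & SPEC =====
def Spec_normalize_field_value_py (value : String) (out : String) : Prop := out = normalize_field_value_py_alt value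
instance (value : String) (out : String) : Decidable (Spec_normalize_field_value_py value out) := by unfold Spec_normalize_field_value_py; infer_instance

-- ===== CLAIM (what is proved, stated in full; the proofs are below) =====
def Claim_equal_normalize_field_value_py : Prop := ∀ (value : String), Dom_normalize_field_value_py value → Spec_normalize_field_value_py value (normalize_field_value_py value)

-- ===== LEMMAS AND PROOFS =====

-- structural model of splitting on a single character
def splitA (s : Char) : List Char → List (List Char)
  | [] => [[]]
  | c :: rest => if c = s then [] :: splitA s rest else (splitA s rest).modifyHead (c :: ·)

theorem splitA_ne_nil (s : Char) (l : List Char) : splitA s l ≠ [] := by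
  induction l with
  | nil => simp [splitA]
  | cons c rest ih =>
    simp only [splitA]
    split
    · simp
    · cases h : splitA s rest with
      | nil => exact absurd h ih
      | cons x xs => simp

theorem splitOn_go_spec (s : Char) (l : List Char) :
    ∀ (fuel : Nat) (cur : List Char) (acc : List (List Char)), l.length < fuel →
      PySem.Chars.splitOn.go [s] fuel l cur acc
        = acc.reverse ++ (splitA s l).modifyHead (cur.reverse ++ ·) := by
  induction l with
  | nil =>
    intro fuel cur acc h
    cases fuel with
    | zero => omega
    | succ f => simp [PySem.Chars.splitOn.go, splitA]
  | cons c rest ih =>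
    intro fuel cur acc h
    cases fuel with
    | zero => omega
    | succ f =>
      by_cases hc : c = s
      · subst hc
        rw [show PySem.Chars.splitOn.go [c] (f+1) (c :: rest) cur acc
              = PySem.Chars.splitOn.go [c] f rest [] (cur.reverse :: acc) by
            simp [PySem.Chars.splitOn.go, List.isPrefixOf, List.drop]]
        rw [ih f [] (cur.reverse :: acc) (by simpa using Nat.lt_of_succ_lt_succ h)]
        simp only [splitA]
        cases splitA c rest <;> simp
      · rw [show PySem.Chars.splitOn.go [s] (f+1) (c :: rest) cur acc
              = PySem.Chars.splitOn.go [s] f rest (c :: cur) acc by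
            simp only [PySem.Chars.splitOn.go, List.isPrefixOf]
            simp only [Bool.and_true, beq_iff_eq]
            rw [if_neg (by exact fun hsc => hc hsc.symm)]]
        rw [ih f (c :: cur) acc (by simpa using Nat.lt_of_succ_lt_succ h)]
        simp only [splitA, if_neg hc]
        cases hsp : splitA s rest with
        | nil => exact absurd hsp (splitA_ne_nil s rest)
        | cons x xs => simp

theorem splitOn_eq_splitA (s : Char) (l : List Char) :
    PySem.Chars.splitOn l [s] = splitA s l := by
  rw [show PySem.Chars.splitOn l [s] = PySem.Chars.splitOn.go [s] (l.length + 1) l [] [] from rfl]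
  rw [splitOn_go_spec s l (l.length + 1) [] [] (by omega)]
  cases h : splitA s l with
  | nil => exact absurd h (splitA_ne_nil s l)
  | cons x xs => simp

-- structural model of the while-pop loop: drop trailing empty components
def pt : List (List Char) → List (List Char)
  | [] => []
  | x :: xs => if pt xs = [] ∧ x = [] then [] else x :: pt xs

theorem pt_append_singleton (xs : List (List Char)) (x : List Char) :
    pt (xs ++ [x]) = if x = [] then pt xs else xs ++ [x] := by
  induction xs with
  | nil => by_cases hx : x = [] <;> simp [pt, hx]
  | cons y ys ih =>
    by_cases hx : x = []
    · simp only [List.cons_append, pt, ih, if_pos hx]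
    · simp only [List.cons_append, pt, ih, if_neg hx]
      simp

theorem popLoopA_eq_pt (l : List (List Char)) : popLoopA l = pt l := by
  induction l using List.reverseRecOn with
  | nil => rw [popLoopA]; simp [pt]
  | append_singleton xs x ih =>
    rw [popLoopA, pt_append_singleton]
    by_cases hx : x = []
    · subst hx
      rw [dif_pos ⟨by simp, by simp [PySem.List.pyGet?, PySem.List.pyIdx?]⟩]
      rw [if_pos rfl, List.dropLast_concat]
      exact ih
    · rw [dif_neg, if_neg hx]
      rintro ⟨-, hget⟩
      rw [show PySem.List.pyGet? (xs ++ [x]) (-1) = some x by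
        simp [PySem.List.pyGet?, PySem.List.pyIdx?]] at hget
      exact hx (Option.some.injEq .. ▸ hget.symm ▸ rfl)

-- structural model of rstrip('^') from the front
def g : List Char → List Char
  | [] => []
  | c :: rest => if c = '^' ∧ g rest = [] then [] else c :: g rest

def rsc (l : List Char) : List Char := (List.dropWhile (· == '^') l.reverse).reverse

theorem rsc_cons (c : Char) (rest : List Char) :
    rsc (c :: rest) = if c = '^' ∧ rsc rest = [] then [] else c :: rsc rest := by
  unfold rsc
  rw [List.reverse_cons, List.dropWhile_append]
  by_cases he : (List.dropWhile (· == '^') rest.reverse).isEmpty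
  · rw [if_pos he]
    have hr : (List.dropWhile (· == '^') rest.reverse).reverse = [] := by
      rw [List.isEmpty_iff] at he; simp [he]
    by_cases hc : c = '^'
    · subst hc
      rw [if_pos ⟨rfl, hr⟩]
      simp [List.dropWhile]
    · rw [if_neg (fun h => hc h.1), hr]
      have : (c == '^') = false := by simpa using hc
      simp [List.dropWhile, this]
  · rw [if_neg he]
    have hr : (List.dropWhile (· == '^') rest.reverse).reverse ≠ [] := by
      simp only [List.isEmpty_iff] at he; simp [he]
    rw [if_neg (fun h => hr h.2)]
    simp

theorem g_eq_rsc (l : List Char) : g l = rsc l := by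
  induction l with
  | nil => simp [g, rsc]
  | cons c rest ih => rw [rsc_cons, ← ih]; rfl

theorem pt_getLast_ne (Z : List (List Char)) (h : pt Z ≠ []) :
    (pt Z).getLast? ≠ some ([] : List Char) := by
  induction Z with
  | nil => simp [pt] at h
  | cons z zs ihz =>
    by_cases hcond : pt zs = [] ∧ z = []
    · simp [pt, hcond] at h
    · rw [show pt (z :: zs) = z :: pt zs from by simp [pt, hcond]]
      cases hh : pt zs with
      | nil =>
        simp
        exact fun hz => hcond ⟨hh, hz⟩
      | cons w ws =>
        have := ihz (by simp [hh])
        rw [hh] at this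
        simpa [List.getLast?_cons_cons] using this

theorem join_ne_nil_of_getLast (Y : List (List Char)) (hne : Y ≠ [])
    (hl : Y.getLast? ≠ some ([] : List Char)) : PySem.Chars.join ['^'] Y ≠ [] := by
  cases Y with
  | nil => exact absurd rfl hne
  | cons y ys =>
    cases ys with
    | nil =>
      rw [PySem.Chars.join_singleton]
      simpa using hl
    | cons z zs =>
      rw [PySem.Chars.join_cons_cons]
      simp

theorem join_pt_eq_nil_iff (X : List (List Char)) :
    PySem.Chars.join ['^'] (pt X) = [] ↔ pt X = [] := by
  cases h : pt X with
  | nil => simp [PySem.Chars.join_nil]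
  | cons y ys =>
    constructor
    · intro hj
      exact absurd hj (h ▸ join_ne_nil_of_getLast (pt X) (by simp [h]) (pt_getLast_ne X (by simp [h])))
    · intro hpt; cases hpt

theorem join_cons_nonnil (s : Char) (c : Char) (x : List Char) (ys : List (List Char)) :
    PySem.Chars.join [s] ((c :: x) :: ys) = c :: PySem.Chars.join [s] (x :: ys) := by
  cases ys with
  | nil => simp [PySem.Chars.join_singleton]
  | cons z zs => simp [PySem.Chars.join_cons_cons]

theorem join_pt_splitA_eq_g (cs : List Char) :
    PySem.Chars.join ['^'] (pt (splitA '^' cs)) = g cs := by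
  induction cs with
  | nil => simp [splitA, pt, g, PySem.Chars.join_nil]
  | cons c rest ih =>
    by_cases hc : c = '^'
    · subst hc
      rw [show splitA '^' ('^' :: rest) = [] :: splitA '^' rest from by simp [splitA]]
      by_cases hpt : pt (splitA '^' rest) = []
      · have hg : g rest = [] := by rw [← ih]; simp [hpt, PySem.Chars.join_nil]
        rw [show g ('^' :: rest) = [] from by simp [g, hg]]
        simp [pt, hpt, PySem.Chars.join_nil]
      · have hg : g rest ≠ [] := by
          rw [← ih]
          exact fun hj => hpt ((join_pt_eq_nil_iff _).mp hj)
        rw [show pt ([] :: splitA '^' rest) = [] :: pt (splitA '^' rest) from by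
          simp [pt, hpt]]
        cases hpp : pt (splitA '^' rest) with
        | nil => exact absurd hpp hpt
        | cons y ys =>
          rw [PySem.Chars.join_cons_cons]
          rw [show g ('^' :: rest) = '^' :: g rest from by
            simp only [g]; rw [if_neg (fun h => hg h.2)]]
          rw [← ih, hpp]
          rfl
    · rw [show splitA '^' (c :: rest) = (splitA '^' rest).modifyHead (c :: ·) from by
        simp [splitA, hc]]
      cases hsp : splitA '^' rest with
      | nil => exact absurd hsp (splitA_ne_nil '^' rest)
      | cons x xs =>
        simp only [List.modifyHead]
        by_cases hcond : pt xs = [] ∧ x = []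
        · have hpt : pt (x :: xs) = [] := by simp [pt, hcond]
          have hg : g rest = [] := by
            rw [← ih, hsp, hpt, PySem.Chars.join_nil]
          rw [show pt ((c :: x) :: xs) = (c :: x) :: pt xs from by simp [pt]]
          rw [hcond.1, hcond.2, PySem.Chars.join_singleton]
          rw [show g (c :: rest) = c :: g rest from by
            simp only [g]; rw [if_neg (fun h => hc h.1)]]
          rw [hg]
        · have hptx : pt (x :: xs) = x :: pt xs := by simp [pt, hcond]
          rw [show pt ((c :: x) :: xs) = (c :: x) :: pt xs from by simp [pt]]
          rw [join_cons_nonnil, ← hptx, ← hsp, ih]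
          rw [show g (c :: rest) = c :: g rest from by
            simp only [g]; rw [if_neg (fun h => hc h.1)]]

theorem per_rep (rep : List Char) :
    PySem.Chars.join ['^'] (popLoopA (PySem.Chars.splitOn rep ['^']))
      = (List.dropWhile (· == '^') rep.reverse).reverse := by
  rw [splitOn_eq_splitA, popLoopA_eq_pt, join_pt_splitA_eq_g, g_eq_rsc]; rfl

-- ===== VERDICT (by name: the statement is the Claim_ definition above) =====
theorem normalize_field_value_py_spec : Claim_equal_normalize_field_value_py := by
  intro value _
  unfold Spec_normalize_field_value_py normalize_field_value_py normalize_field_value_py_alt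
  simp only [PySem.List.foldl_append_singleton_eq_map]
  congr 1
  apply congrArg
  apply List.map_congr_left
  intro rep _
  exact per_rep rep
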